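-- pv_equiv track=rewrite | github.com/balajiyogi/Balaji | count_subarray.py | count
-- ===== SOURCE A (Python) =====
-- def count(arr, n, k):
--     s = 0
--     i = 0
--     while (i < n):
--         if (arr[i] > k):
--             i = i + 1
--             continue
--         count = 0
--         while (i < n and arr[i] <= k):
--             i = i + 1
--             count = count + 1
--         s = s + ((count*(count + 1))//2)
--     return (n*(n + 1)//2 - s)
-- ===== SOURCE B (Python) =====
-- def count(arr, n, k):
--     total = 0
--     last = -1
--     for i in range(n):
--         if arr[i] > k:
--             last = i
--         total += last + 1
--     return total
-- ===== Notes on version B (the rewrite author's own statement) =====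
-- stated objective: simpler
-- what changed: Replaces the complement scheme (n*(n+1)//2 minus a triangular sum per maximal run of <=k elements, computed with nested while loops) by a single for loop that tracks the last index with arr[i] > k and adds last+1, the number of subarrays ending at i that contain an element > k.
-- intended difference: For n <= -2 A returns n*(n+1)//2 (a positive count, e.g. 1 for arr=[], n=-2) because it applies the complement formula to a negative length although its loop scanned nothing; B returns 0, the intended count of subarrays in an empty range. — e.g. on count([], -2, 0): A returns 1, B returns 0
import Mathlib
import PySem

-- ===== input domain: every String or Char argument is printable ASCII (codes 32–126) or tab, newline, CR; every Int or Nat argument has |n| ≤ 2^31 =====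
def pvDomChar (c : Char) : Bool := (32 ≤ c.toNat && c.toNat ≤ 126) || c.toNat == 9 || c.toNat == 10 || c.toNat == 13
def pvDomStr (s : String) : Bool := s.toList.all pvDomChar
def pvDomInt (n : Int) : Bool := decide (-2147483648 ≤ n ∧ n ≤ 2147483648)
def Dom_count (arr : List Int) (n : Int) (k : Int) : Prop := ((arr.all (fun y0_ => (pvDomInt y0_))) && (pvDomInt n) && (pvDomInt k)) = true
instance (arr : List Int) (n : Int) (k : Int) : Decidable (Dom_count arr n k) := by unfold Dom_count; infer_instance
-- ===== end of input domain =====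

-- B replaces A's complement-over-runs scheme with one direct pass (track the last index > k, add last+1
-- per position); same O(n) cost, simpler code. Return-value equivalence on Pre_; for n ≤ -2 B returns 0
-- where A returns the complement formula's positive value (see D_count).

-- ===== PORT A =====
-- inner while loop of A: while (i < n and arr[i] <= k): i += 1; count += 1 ; returns (i, count)
def countA_inner (arr : List Int) (n : Int) (k : Int) (i : Int) (cnt : Int) : Int × Int :=
  if h : i < n ∧ (PySem.List.pyGet? arr i).getD 0 ≤ k then
    countA_inner arr n k (i + 1) (cnt + 1)
  else (i, cnt)
termination_by (n - i).toNat
decreasing_by omega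

-- outer while loop of A, with a Nat fuel (each iteration increases i by ≥ 1, so n.toNat + 1 suffices)
def countA_outer (arr : List Int) (n : Int) (k : Int) : Nat → Int → Int → Int
  | 0, _, s => s
  | f + 1, i, s =>
    if i < n then
      if k < (PySem.List.pyGet? arr i).getD 0 then
        countA_outer arr n k f (i + 1) s
      else
        let r := countA_inner arr n k i 0
        countA_outer arr n k f r.1 (s + PySem.Int.floordiv (r.2 * (r.2 + 1)) 2)
    else s

def count (arr : List Int) (n : Int) (k : Int) : Int :=
  PySem.Int.floordiv (n * (n + 1)) 2 - countA_outer arr n k (n.toNat + 1) 0 0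

-- ===== PORT B =====
-- loop body of B: if arr[i] > k: last = i ; total += last + 1   (state = (total, last))
def pvBstep (arr : List Int) (k : Int) (st : Int × Int) (i : Int) : Int × Int :=
  let last := if k < (PySem.List.pyGet? arr i).getD 0 then i else st.2
  (st.1 + (last + 1), last)

def count_alt (arr : List Int) (n : Int) (k : Int) : Int :=
  ((PySem.List.pyRange 0 n 1).foldl (pvBstep arr k) (0, -1)).1

-- ===== PRECONDITION & SPEC =====
-- Pre_ excludes exactly the inputs where A raises IndexError: n > len(arr) (then arr[i] is read at i = len(arr)).
def Pre_count (arr : List Int) (n : Int) (k : Int) : Prop := n ≤ (arr.length : Int)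
instance (arr : List Int) (n : Int) (k : Int) : Decidable (Pre_count arr n k) := by unfold Pre_count; infer_instance
def pvWitness_count : List Int × Int × Int := ([1, 3], 2, 2)

-- For n ≤ -2 A returns n*(n+1)//2, a positive value (e.g. 1 for arr=[], n=-2), although its loop scanned
-- nothing; B returns 0, the intended number of subarrays in an empty index range.
def D_count (arr : List Int) (n : Int) (k : Int) : Prop := n ≤ -2
instance (arr : List Int) (n : Int) (k : Int) : Decidable (D_count arr n k) := by unfold D_count; infer_instance

def Spec_count (arr : List Int) (n : Int) (k : Int) (out : Int) : Prop := ¬ D_count arr n k → out = count_alt arr n k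
instance (arr : List Int) (n : Int) (k : Int) (out : Int) : Decidable (Spec_count arr n k out) := by unfold Spec_count; infer_instance

def pvDiffWitness_count : List Int × Int × Int := ([], -2, 0)
def pvDiffWitnessOut_count : Int × Int := (1, 0)

-- ===== CLAIM (what is proved, stated in full; the proofs are below) =====
def Claim_unchanged_count : Prop := ∀ (arr : List Int) (n : Int) (k : Int), Dom_count arr n k → Pre_count arr n k → Spec_count arr n k (count arr n k)
def Claim_changed_count : Prop := Dom_count (pvDiffWitness_count.1) (pvDiffWitness_count.2.1) (pvDiffWitness_count.2.2) ∧ Pre_count (pvDiffWitness_count.1) (pvDiffWitness_count.2.1) (pvDiffWitness_count.2.2) ∧ D_count (pvDiffWitness_count.1) (pvDiffWitness_count.2.1) (pvDiffWitness_count.2.2) ∧ count (pvDiffWitness_count.1) (pvDiffWitness_count.2.1) (pvDiffWitness_count.2.2) = pvDiffWitnessOut_count.1 ∧ count_alt (pvDiffWitness_count.1) (pvDiffWitness_count.2.1) (pvDiffWitness_count.2.2) = pvDiffWitnessOut_count.2 ∧ pvDiffWitnessOut_count.1 ≠ pvDiffWitnessOut_count.2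
def Claim_exact_count : Prop := ∀ (arr : List Int) (n : Int) (k : Int), Dom_count arr n k → Pre_count arr n k → D_count arr n k → count arr n k ≠ count_alt arr n k

-- ===== LEMMAS AND PROOFS =====

-- triangular number n*(n+1)//2 as an Int function (proof-side abbreviation; definitionally A's floordiv)
def pvTri (m : Int) : Int := PySem.Int.floordiv (m * (m + 1)) 2

lemma pvTri_two (m : Int) : 2 * pvTri m = m * (m + 1) := by
  unfold pvTri
  rw [PySem.Int.floordiv_eq_ediv_of_pos (by norm_num)]
  exact Int.mul_ediv_cancel' (Int.even_mul_succ_self m).two_dvd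

lemma pvTri_add (a c : Int) : pvTri (a + c) = pvTri a + c * a + pvTri c := by
  have h : 2 * pvTri (a + c) = 2 * (pvTri a + c * a + pvTri c) := by
    linear_combination pvTri_two (a + c) - pvTri_two a - pvTri_two c
  omega

-- B's fold restarted at index i with state (t, last)
def pvBgo (arr : List Int) (n : Int) (k : Int) (i : Int) (t : Int) (last : Int) : Int × Int :=
  (PySem.List.pyRange i n 1).foldl (pvBstep arr k) (t, last)

lemma pvBgo_stop (arr : List Int) (n k i t last : Int) (h : n ≤ i) :
    pvBgo arr n k i t last = (t, last) := by
  simp [pvBgo, PySem.List.pyRange_one_eq_nil h]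

lemma pvBgo_step (arr : List Int) (n k i t last : Int) (h : i < n) :
    pvBgo arr n k i t last =
      pvBgo arr n k (i + 1)
        (t + ((if k < (PySem.List.pyGet? arr i).getD 0 then i else last) + 1))
        (if k < (PySem.List.pyGet? arr i).getD 0 then i else last) := by
  rw [pvBgo, PySem.List.pyRange_one_cons h]
  simp [pvBgo, pvBstep]

lemma pvBgo_run (arr : List Int) (n k : Int) : ∀ (c : Nat) (i t last : Int),
    i + (c : Int) ≤ n →
    (∀ j : Int, i ≤ j → j < i + (c : Int) → (PySem.List.pyGet? arr j).getD 0 ≤ k) →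
    pvBgo arr n k i t last = pvBgo arr n k (i + (c : Int)) (t + (c : Int) * (last + 1)) last := by
  intro c
  induction c with
  | zero => intro i t last _ _; simp
  | succ c ih =>
    intro i t last hle hall
    have hc : ((c : Int) + 1) = ((c + 1 : Nat) : Int) := by push_cast; ring
    have hi : i < n := by push_cast at hle; omega
    have hik : ¬ k < (PySem.List.pyGet? arr i).getD 0 := by
      have := hall i le_rfl (by push_cast; omega)
      omega
    rw [pvBgo_step arr n k i t last hi, if_neg hik]
    rw [ih (i + 1) (t + (last + 1)) last (by push_cast at hle ⊢; omega)
        (fun j hj1 hj2 => hall j (by omega) (by push_cast at hj2 ⊢; omega))]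
    have h1 : i + 1 + (c : Int) = i + ((c + 1 : Nat) : Int) := by push_cast; ring
    have h2 : t + (last + 1) + (c : Int) * (last + 1) = t + ((c + 1 : Nat) : Int) * (last + 1) := by
      push_cast; ring
    rw [h1, h2]

lemma countA_inner_spec (arr : List Int) (n k : Int) : ∀ (m : Nat) (i cnt : Int),
    (n - i).toNat ≤ m → i ≤ n →
    (countA_inner arr n k i cnt).2 - cnt = (countA_inner arr n k i cnt).1 - i ∧
    i ≤ (countA_inner arr n k i cnt).1 ∧
    (countA_inner arr n k i cnt).1 ≤ n ∧
    (∀ j : Int, i ≤ j → j < (countA_inner arr n k i cnt).1 → (PySem.List.pyGet? arr j).getD 0 ≤ k) ∧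
    ((countA_inner arr n k i cnt).1 = n ∨ ¬ (PySem.List.pyGet? arr (countA_inner arr n k i cnt).1).getD 0 ≤ k) := by
  intro m
  induction m with
  | zero =>
    intro i cnt hm hin
    have hi : i = n := by omega
    rw [countA_inner, dif_neg (by omega)]
    exact ⟨by omega, le_rfl, hin, fun j hj1 hj2 => absurd hj2 (by omega), Or.inl hi⟩
  | succ m ih =>
    intro i cnt hm hin
    by_cases h : i < n ∧ (PySem.List.pyGet? arr i).getD 0 ≤ k
    · rw [countA_inner, dif_pos h]
      obtain ⟨e1, e2, e3, e4, e5⟩ := ih (i + 1) (cnt + 1) (by omega) (by omega)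
      refine ⟨by omega, by omega, e3, ?_, e5⟩
      intro j hj1 hj2
      by_cases hji : j = i
      · exact hji ▸ h.2
      · exact e4 j (by omega) hj2
    · rw [countA_inner, dif_neg h]
      refine ⟨by omega, le_rfl, hin, fun j hj1 hj2 => absurd hj2 (by omega), ?_⟩
      by_cases hi : i = n
      · exact Or.inl hi
      · exact Or.inr (fun hk => h ⟨by omega, hk⟩)

lemma countA_outer_s (arr : List Int) (n k : Int) : ∀ (f : Nat) (i s : Int),
    countA_outer arr n k f i s = s + countA_outer arr n k f i 0 := by
  intro f
  induction f with
  | zero => intro i s; simp [countA_outer]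
  | succ f ih =>
    intro i s
    simp only [countA_outer, zero_add]
    split_ifs with h1 h2
    · rw [ih]
    · conv_rhs => rw [ih]
      rw [ih]; ring
    · ring

lemma pvMain (arr : List Int) (n k : Int) : ∀ (f : Nat) (i t last : Int),
    (n - i).toNat ≤ f → 0 ≤ i → i ≤ n →
    (last = i - 1 ∨ i = n ∨ ¬ (PySem.List.pyGet? arr i).getD 0 ≤ k) →
    (pvBgo arr n k i t last).1 = t + (pvTri n - pvTri i) - countA_outer arr n k f i 0 := by
  intro f
  induction f with
  | zero =>
    intro i t last hf h0 hn _
    have hi : i = n := by omega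
    rw [hi, pvBgo_stop arr n k n t last le_rfl,
      show countA_outer arr n k 0 n 0 = 0 from rfl]
    ring
  | succ f ih =>
    intro i t last hf h0 hn hH
    by_cases hin : i < n
    · by_cases hgt : k < (PySem.List.pyGet? arr i).getD 0
      · rw [pvBgo_step arr n k i t last hin, if_pos hgt]
        rw [ih (i + 1) (t + (i + 1)) i (by omega) (by omega) (by omega) (Or.inl (by ring))]
        rw [show countA_outer arr n k (f + 1) i 0 = countA_outer arr n k f (i + 1) 0 from by
          rw [countA_outer, if_pos hin, if_pos hgt]]
        have ht := pvTri_add i 1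
        have t1 : pvTri 1 = 1 := by decide
        omega
      · have hlast : last = i - 1 := by
          rcases hH with h | h | h
          · exact h
          · omega
          · omega
        obtain ⟨e1, e2, e3, e4, e5⟩ :=
          countA_inner_spec arr n k (n - i).toNat i 0 le_rfl hn
        set r := countA_inner arr n k i 0 with hr
        have hprog : i + 1 ≤ r.1 := by
          by_contra hcon
          have hri : r.1 = i := by omega
          rcases e5 with h | h
          · omega
          · rw [hri] at h; omega
        have hout : countA_outer arr n k (f + 1) i 0 =
            PySem.Int.floordiv (r.2 * (r.2 + 1)) 2 + countA_outer arr n k f r.1 0 := by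
          rw [countA_outer, if_pos hin, if_neg hgt]
          rw [← hr, countA_outer_s arr n k f r.1]
          ring
        have hc : ((r.1 - i).toNat : Int) = r.1 - i := by omega
        rw [pvBgo_run arr n k (r.1 - i).toNat i t last (by omega)
          (fun j hj1 hj2 => e4 j hj1 (by omega))]
        rw [ih (i + ((r.1 - i).toNat : Int)) (t + ((r.1 - i).toNat : Int) * (last + 1)) last
          (by omega) (by omega) (by omega) (by rw [hc, show i + (r.1 - i) = r.1 from by ring]; exact Or.inr e5)]
        rw [hout, hc, show i + (r.1 - i) = r.1 from by ring]
        have hr2 : r.2 = r.1 - i := by omega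
        have hTri := pvTri_add i (r.1 - i)
        rw [show i + (r.1 - i) = r.1 from by ring] at hTri
        have hdf : PySem.Int.floordiv (r.2 * (r.2 + 1)) 2 = pvTri (r.1 - i) := by
          rw [hr2]; rfl
        rw [hdf]
        have hm : (r.1 - i) * (last + 1) = (r.1 - i) * i := by rw [hlast]; ring
        rw [hm]
        omega
    · have hi : i = n := by omega
      rw [hi, pvBgo_stop arr n k n t last le_rfl,
        show countA_outer arr n k (f + 1) n 0 = 0 from by rw [countA_outer, if_neg (lt_irrefl n)]]
      ring

-- ===== VERDICT (by name: the statement is the Claim_ definition above) =====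
theorem count_spec : Claim_unchanged_count := by
  intro arr n k _dom _hpre hnd
  have hn1 : -1 ≤ n := by
    simp [D_count] at hnd; omega
  by_cases hn : 0 ≤ n
  · have hmain := pvMain arr n k (n.toNat + 1) 0 0 (-1) (by omega) le_rfl hn (Or.inl (by ring))
    have hB : count_alt arr n k = (pvBgo arr n k 0 0 (-1)).1 := rfl
    have h0 : pvTri 0 = 0 := by decide
    show count arr n k = count_alt arr n k
    rw [hB, hmain, count]
    have hTn : pvTri n = PySem.Int.floordiv (n * (n + 1)) 2 := rfl
    omega
  · have hneg : n = -1 := by omega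
    subst hneg
    show count arr (-1) k = count_alt arr (-1) k
    rw [count, count_alt, PySem.List.pyRange_one_eq_nil (by norm_num)]
    simp [countA_outer]

theorem count_changed : Claim_changed_count := by unfold Claim_changed_count; decide

theorem count_tight : Claim_exact_count := by
  intro arr n k _dom _hpre hd
  have hn : n ≤ -2 := by simpa [D_count] using hd
  have hfuel : n.toNat + 1 = 1 := by omega
  rw [count, count_alt, hfuel,
    show countA_outer arr n k 1 0 0 = 0 from by rw [countA_outer, if_neg (by omega)],
    PySem.List.pyRange_one_eq_nil (by omega)]
  simp only [List.foldl_nil]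
  have h2 : (2 : Int) ≤ n * (n + 1) := by
    have hp := mul_nonneg (show (0 : Int) ≤ -(n + 2) by omega) (show (0 : Int) ≤ -(n - 1) by omega)
    nlinarith [hp]
  have h1 : 1 ≤ PySem.Int.floordiv (n * (n + 1)) 2 := by
    rw [PySem.Int.le_floordiv_iff_mul_le (by norm_num)]
    linarith
  show PySem.Int.floordiv (n * (n + 1)) 2 - 0 ≠ (0 : Int)
  omega
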